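-- pv_equiv track=rewrite | github.com/adomi-io/mcp-global-search | src/mcp_server/meili_mcp.py | _parse_allowed
-- ===== SOURCE A (Python) =====
-- from typing import Any, Dict, List, Literal, Optional, Set, Tuple, Union, cast
--
-- def _parse_allowed(raw: Optional[str]) -> List[str]:
--     """Parse comma/whitespace/newline separated index names."""
--     if not raw:
--         return []
--
--     parts: List[str] = []
--
--     for chunk in raw.replace("\n", ",").replace(" ", ",").split(","):
--         s = chunk.strip()
--
--         if s:
--             parts.append(s)
--
--     return parts
-- ===== SOURCE B (Python) =====
-- from typing import List, Optional
--
-- def _parse_allowed(raw: Optional[str]) -> List[str]: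
--     """Parse comma/whitespace/newline separated index names (single pass)."""
--     if not raw:
--         return []
--
--     parts: List[str] = []
--     cur: List[str] = []
--
--     for ch in raw:
--         if ch == ',' or ch == '\n' or ch == ' ':
--             tok = ''.join(cur).strip()
--             if tok:
--                 parts.append(tok)
--             cur = []
--         else:
--             cur.append(ch)
--
--     tok = ''.join(cur).strip()
--     if tok:
--         parts.append(tok)
--     return parts
-- ===== Notes on version B (the rewrite author's own statement) =====
-- stated objective: alternative
-- what changed: Replaced A's replace-newline-and-space-with-comma, split-on-comma, strip-and-filter pipeline by a single left-to-right pass over the string that threads a character buffer, flushing it (strip, append if non-empty) at each ',', '\n' or ' ' and once after the loop.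
import Mathlib
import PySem

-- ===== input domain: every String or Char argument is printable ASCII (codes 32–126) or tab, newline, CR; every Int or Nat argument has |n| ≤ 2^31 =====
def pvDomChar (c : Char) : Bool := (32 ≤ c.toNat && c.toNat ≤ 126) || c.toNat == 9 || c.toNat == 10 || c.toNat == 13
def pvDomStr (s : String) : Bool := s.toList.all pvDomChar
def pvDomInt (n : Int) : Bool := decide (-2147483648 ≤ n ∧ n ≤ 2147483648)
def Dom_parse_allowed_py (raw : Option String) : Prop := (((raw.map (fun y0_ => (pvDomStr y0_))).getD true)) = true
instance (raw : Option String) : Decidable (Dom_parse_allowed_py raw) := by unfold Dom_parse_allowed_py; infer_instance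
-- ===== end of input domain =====

-- B replaces A's replace+replace+split+filter chain with a single left-to-right pass
-- threading a character-buffer accumulator (objective: alternative decomposition; no speed claim).


-- ===== PORT A =====
-- strings handled as their code-point lists; PySem.Chars.* are the exact Python string primitives
def parse_allowed_py (raw : Option String) : List String :=
  match raw with
  | none => []
  | some r =>
    if r = "" then []
    else
      (PySem.Chars.splitOn
          (PySem.Chars.replace (PySem.Chars.replace r.toList ['\n'] [',']) [' '] [','])
          [',']).foldl
        (fun parts chunk =>
          let s := PySem.Chars.strip chunk
          if s ≠ [] then parts ++ [String.ofList s] else parts)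
        []

-- ===== PORT B =====
-- finalise the buffer: strip it, append if non-empty (Source B's repeated tail code)
def pvFlush (parts : List String) (cur : List Char) : List String :=
  let tok := PySem.Chars.strip cur
  if tok ≠ [] then parts ++ [String.ofList tok] else parts

def parse_allowed_py_alt (raw : Option String) : List String :=
  match raw with
  | none => []
  | some r =>
    if r = "" then []
    else
      let st := r.toList.foldl
        (fun (st : List String × List Char) c =>
          if c = ',' ∨ c = '\n' ∨ c = ' ' then (pvFlush st.1 st.2, []) else (st.1, st.2 ++ [c]))
        ([], [])
      pvFlush st.1 st.2

-- ===== PRECONDITION & SPEC =====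
def Spec_parse_allowed_py (raw : Option String) (out : List String) : Prop := out = parse_allowed_py_alt raw
instance (raw : Option String) (out : List String) : Decidable (Spec_parse_allowed_py raw out) := by unfold Spec_parse_allowed_py; infer_instance

-- ===== CLAIM (what is proved, stated in full; the proofs are below) =====
def Claim_equal_parse_allowed_py : Prop := ∀ (raw : Option String), Dom_parse_allowed_py raw → Spec_parse_allowed_py raw (parse_allowed_py raw)

-- ===== LEMMAS AND PROOFS =====

-- the character map performed by A's two replaces
def pvF (c : Char) : Char := if c = '\n' ∨ c = ' ' then ',' else c

-- pure version of PySem.Chars.splitOn.go on the separator [','] (rcur is the reversed current chunk)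
def pvSplitC : List Char → List Char → List (List Char)
  | [], rcur => [rcur.reverse]
  | c :: t, rcur => if c = ',' then rcur.reverse :: pvSplitC t [] else pvSplitC t (c :: rcur)

-- A's fold over the chunks, fused with the chunk construction
def pvAgo : List Char → List String → List Char → List String
  | [], parts, rcur => pvFlush parts rcur.reverse
  | c :: t, parts, rcur =>
    if c = ',' then pvAgo t (pvFlush parts rcur.reverse) [] else pvAgo t parts (c :: rcur)

-- B's loop with the trailing flush folded in
def pvBgo : List Char → List String → List Char → List String
  | [], parts, cur => pvFlush parts cur
  | c :: t, parts, cur =>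
    if c = ',' ∨ c = '\n' ∨ c = ' ' then pvBgo t (pvFlush parts cur) [] else pvBgo t parts (cur ++ [c])

theorem pv_replace_go_eq (a b : Char) :
    ∀ (fuel : Nat) (l acc : List Char), l.length ≤ fuel →
      PySem.Chars.replace.go [a] [b] fuel l acc
        = acc.reverse ++ l.map (fun c => if c = a then b else c) := by
  intro fuel
  induction fuel with
  | zero =>
    intro l acc h
    have : l = [] := by cases l <;> simp_all
    subst this
    simp [PySem.Chars.replace.go]
  | succ n ih =>
    intro l acc h
    cases l with
    | nil => simp [PySem.Chars.replace.go]
    | cons c t =>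
      by_cases hc : c = a
      · subst hc
        have hp : List.isPrefixOf [c] (c :: t) = true := by simp [List.isPrefixOf]
        simp only [PySem.Chars.replace.go, hp, if_pos]
        rw [show List.drop (List.length [c]) (c :: t) = t from by simp,
            show List.reverse [b] ++ acc = b :: acc from by simp]
        rw [ih t (b :: acc) (by simpa using Nat.le_of_succ_le_succ h)]
        simp
      · have hp : List.isPrefixOf [a] (c :: t) = false := by
          simp [List.isPrefixOf]
          exact fun h' => absurd h'.symm hc
        simp only [PySem.Chars.replace.go, hp]
        rw [if_neg (by simp), ih t (c :: acc) (by simpa using Nat.le_of_succ_le_succ h)]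
        simp [hc]

theorem pv_replace_single (a b : Char) (l : List Char) :
    PySem.Chars.replace l [a] [b] = l.map (fun c => if c = a then b else c) := by
  simp [PySem.Chars.replace]
  simpa using pv_replace_go_eq a b l.length l [] (le_refl _)

theorem pv_splitOn_go_eq :
    ∀ (fuel : Nat) (l rcur : List Char) (acc : List (List Char)), l.length ≤ fuel →
      PySem.Chars.splitOn.go [','] fuel l rcur acc = acc.reverse ++ pvSplitC l rcur := by
  intro fuel
  induction fuel with
  | zero =>
    intro l rcur acc h
    have : l = [] := by cases l <;> simp_all
    subst this
    simp [PySem.Chars.splitOn.go, pvSplitC]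
  | succ n ih =>
    intro l rcur acc h
    cases l with
    | nil => simp [PySem.Chars.splitOn.go, pvSplitC]
    | cons c t =>
      by_cases hc : c = ','
      · subst hc
        have hp : List.isPrefixOf [','] (',' :: t) = true := by simp [List.isPrefixOf]
        simp only [PySem.Chars.splitOn.go, hp, if_pos]
        rw [show List.drop (List.length [',']) (',' :: t) = t from by simp]
        rw [ih t [] (rcur.reverse :: acc) (by simpa using Nat.le_of_succ_le_succ h)]
        simp [pvSplitC]
      · have hp : List.isPrefixOf [','] (c :: t) = false := by
          simp [List.isPrefixOf]
          exact fun h' => absurd h'.symm hc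
        simp only [PySem.Chars.splitOn.go, hp]
        rw [if_neg (by simp), ih t (c :: rcur) acc (by simpa using Nat.le_of_succ_le_succ h)]
        simp [pvSplitC, hc]

theorem pv_splitOn_comma (l : List Char) :
    PySem.Chars.splitOn l [','] = pvSplitC l [] := by
  simpa using pv_splitOn_go_eq (l.length + 1) l [] [] (Nat.le_succ _)

theorem pv_foldA :
    ∀ (l : List Char) (parts : List String) (rcur : List Char),
      (pvSplitC l rcur).foldl
        (fun parts chunk =>
          let s := PySem.Chars.strip chunk
          if s ≠ [] then parts ++ [String.ofList s] else parts)
        parts = pvAgo l parts rcur := by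
  intro l
  induction l with
  | nil => intro parts rcur; simp [pvSplitC, pvAgo, pvFlush]
  | cons c t ih =>
    intro parts rcur
    by_cases hc : c = ','
    · subst hc
      simp only [pvSplitC, pvAgo, if_pos rfl, List.foldl_cons]
      rw [← ih]
      simp [pvFlush]
    · simp only [pvSplitC, pvAgo, if_neg hc]
      exact ih parts (c :: rcur)

theorem pv_foldB :
    ∀ (l : List Char) (parts : List String) (cur : List Char),
      (fun st : List String × List Char => pvFlush st.1 st.2)
        (l.foldl
          (fun (st : List String × List Char) c =>
            if c = ',' ∨ c = '\n' ∨ c = ' ' then (pvFlush st.1 st.2, []) else (st.1, st.2 ++ [c]))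
          (parts, cur)) = pvBgo l parts cur := by
  intro l
  induction l with
  | nil => intro parts cur; simp [pvBgo]
  | cons c t ih =>
    intro parts cur
    by_cases hc : c = ',' ∨ c = '\n' ∨ c = ' '
    · simp only [List.foldl_cons, if_pos hc, pvBgo, ih]
    · simp only [List.foldl_cons, if_neg hc, pvBgo, ih]

theorem pv_map_pvF (l : List Char) :
    (l.map (fun c => if c = '\n' then ',' else c)).map (fun c => if c = ' ' then ',' else c)
      = l.map pvF := by
  rw [List.map_map]
  apply List.map_congr_left
  intro c _
  by_cases h1 : c = '\n' <;> by_cases h2 : c = ' ' <;> simp_all [pvF, Function.comp] <;> decide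

theorem pv_AB :
    ∀ (l : List Char) (parts : List String) (cur : List Char),
      pvAgo (l.map pvF) parts cur.reverse = pvBgo l parts cur := by
  intro l
  induction l with
  | nil => intro parts cur; simp [pvAgo, pvBgo]
  | cons c t ih =>
    intro parts cur
    by_cases hc : c = ',' ∨ c = '\n' ∨ c = ' '
    · have hf : pvF c = ',' := by
        rcases hc with h | h | h <;> subst h <;> simp [pvF]
      simp only [List.map_cons, hf, pvAgo, pvBgo, if_pos hc, List.reverse_reverse]
      simpa using ih (pvFlush parts cur) []
    · push_neg at hc
      have hf : pvF c = c := by simp [pvF, hc.2.1, hc.2.2]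
      simp only [List.map_cons, hf, pvAgo, pvBgo]
      rw [if_neg hc.1, if_neg (by simp [hc.1, hc.2.1, hc.2.2])]
      simpa using ih parts (cur ++ [c])

-- ===== VERDICT (by name: the statement is the Claim_ definition above) =====
theorem parse_allowed_py_spec : Claim_equal_parse_allowed_py := by
  intro raw _
  unfold Spec_parse_allowed_py
  cases raw with
  | none => rfl
  | some r =>
    by_cases hr : r = ""
    · simp [parse_allowed_py, parse_allowed_py_alt, hr]
    · simp only [parse_allowed_py, parse_allowed_py_alt, if_neg hr]
      rw [pv_replace_single, pv_replace_single, pv_map_pvF, pv_splitOn_comma, pv_foldA]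
      have := pv_AB r.toList [] []
      simp only [List.reverse_nil] at this
      rw [this]
      exact (pv_foldB r.toList [] []).symm
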